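-- pv_equiv track=rewrite | github.com/akdasUAF/Metagenome | Gauri/metagenomics_main/decompose_graph.py | resolve_ambiguous_nodes
-- ===== SOURCE A (Python) =====
-- def resolve_ambiguous_nodes(clusters):
--     all_kmers = set().union(*clusters.values())
--     ambiguous_nodes = {kmer for kmer in all_kmers if sum(kmer in cluster for cluster in clusters.values()) > 1}
--     for kmer in ambiguous_nodes:
--         for cluster_id in clusters:
--             if kmer in clusters[cluster_id]:
--                 clusters[cluster_id].remove(kmer)
--     return clusters, ambiguous_nodes
-- ===== SOURCE B (Python) =====
-- def resolve_ambiguous_nodes(clusters):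
--     # One counting pass over all clusters instead of a membership scan of every
--     # cluster for every kmer.
--     counts = {}
--     for cluster in clusters.values():
--         for kmer in cluster:
--             counts[kmer] = counts.get(kmer, 0) + 1
--     ambiguous_nodes = {kmer for kmer, c in counts.items() if c > 1}
--     # One set difference per cluster instead of per-kmer membership test + remove;
--     # mutates each cluster set in place, like A.
--     for cluster in clusters.values():
--         cluster.difference_update(ambiguous_nodes)
--     return clusters, ambiguous_nodes
-- ===== Notes on version B (the rewrite author's own statement) =====
-- stated objective: faster
-- what changed: Replaces the per-kmer membership scan over every cluster with a single counting pass over all clusters, and replaces the per-kmer per-cluster membership-test-plus-remove loop with one set difference per cluster.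
import Mathlib
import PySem

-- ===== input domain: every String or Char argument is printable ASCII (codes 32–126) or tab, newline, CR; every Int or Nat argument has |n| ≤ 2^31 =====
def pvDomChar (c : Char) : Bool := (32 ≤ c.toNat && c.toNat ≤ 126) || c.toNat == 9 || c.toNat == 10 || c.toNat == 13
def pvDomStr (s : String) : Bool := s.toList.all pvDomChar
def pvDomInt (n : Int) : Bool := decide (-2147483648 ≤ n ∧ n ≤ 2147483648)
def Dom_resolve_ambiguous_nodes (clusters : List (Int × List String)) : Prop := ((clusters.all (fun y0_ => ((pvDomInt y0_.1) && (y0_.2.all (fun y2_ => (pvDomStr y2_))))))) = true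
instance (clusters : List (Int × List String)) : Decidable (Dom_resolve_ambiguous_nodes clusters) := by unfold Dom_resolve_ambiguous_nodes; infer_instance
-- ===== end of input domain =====

-- B replaces A's per-kmer membership scan over every cluster by a single counting pass, and
-- A's per-kmer remove loop by one set difference per cluster (objective: faster).
-- Both A and B mutate the clusters dict's sets in place in Python; the equivalence proved
-- here is about the RETURN value (which, for both, contains the updated clusters).

-- ===== PORT A =====
-- body of 'for cluster_id in clusters:' — cluster_id is drawn from the keys, so
-- clusters[cluster_id] is present and getD is exact; the guarded list.remove succeeds.
def pvRemoveInner (kmer : String) (d : PySem.Dict Int (List String)) (cid : Int) :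
    PySem.Dict Int (List String) :=
  if (d.getD cid []).contains kmer then
    d.insert cid ((PySem.List.remove? (d.getD cid []) kmer).getD (d.getD cid []))
  else d

def resolve_ambiguous_nodes (clusters : List (Int × List String)) :
    (List (Int × List String)) × List String :=
  let d : PySem.Dict Int (List String) := PySem.Dict.mk clusters
  -- set().union(*clusters.values()) : successive unions over the values
  let all_kmers : PySem.Set String :=
    d.values.foldl (fun s cluster => PySem.Set.union s cluster) PySem.Set.empty
  -- {kmer for kmer in all_kmers if sum(kmer in cluster for cluster in clusters.values()) > 1}
  let ambiguous_nodes : PySem.Set String :=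
    all_kmers.filter (fun kmer =>
      decide (1 < (d.values.map (fun cluster =>
        if cluster.contains kmer then (1 : Int) else 0)).sum))
  -- the nested removal loops (consuming the set element-by-element; the result does not
  -- depend on the set's iteration order since distinct kmers are removed independently)
  let d' : PySem.Dict Int (List String) :=
    ambiguous_nodes.foldl
      (fun d kmer => d.keys.foldl (fun d cid => pvRemoveInner kmer d cid) d) d
  (d'.items, ambiguous_nodes)

-- ===== PORT B =====
def resolve_ambiguous_nodes_alt (clusters : List (Int × List String)) :
    (List (Int × List String)) × List String :=
  -- counting pass: counts[kmer] = number of clusters containing kmer (each value is a set,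
  -- modelled as its list of distinct elements; the counts do not depend on iteration order)
  let counts : PySem.Dict String Int :=
    clusters.foldl
      (fun counts p => p.2.foldl (fun counts kmer => counts.modify kmer 0 (· + 1)) counts)
      PySem.Dict.empty
  -- {kmer for kmer, c in counts.items() if c > 1}
  let ambiguous_nodes : PySem.Set String :=
    (counts.items.filter (fun p => decide (1 < p.2))).map (·.1)
  -- cluster.difference_update(ambiguous_nodes), one set difference per cluster
  let result : List (Int × List String) :=
    clusters.map (fun p => (p.1, PySem.Set.diff p.2 ambiguous_nodes))
  (result, ambiguous_nodes)

-- ===== PRECONDITION & SPEC =====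
-- A is called on a dict whose values are Python sets. Pre_ excludes association lists with
-- duplicate keys and value lists with duplicate elements: a Python dict cannot have duplicate
-- keys and a Python set cannot have duplicate elements, so such lists represent no input A
-- can be called on.
def Pre_resolve_ambiguous_nodes (clusters : List (Int × List String)) : Prop :=
  (clusters.map (·.1)).Nodup ∧ ∀ p ∈ clusters, p.2.Nodup
instance (clusters : List (Int × List String)) : Decidable (Pre_resolve_ambiguous_nodes clusters) := by
  unfold Pre_resolve_ambiguous_nodes; infer_instance

def pvWitness_resolve_ambiguous_nodes : (List (Int × List String)) :=
  [(1, ["a", "b"]), (2, ["a"])]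

def Spec_resolve_ambiguous_nodes (clusters : List (Int × List String))
    (out : (List (Int × List String)) × List String) : Prop :=
  out = resolve_ambiguous_nodes_alt clusters
instance (clusters : List (Int × List String)) (out : (List (Int × List String)) × List String) :
    Decidable (Spec_resolve_ambiguous_nodes clusters out) := by
  unfold Spec_resolve_ambiguous_nodes; infer_instance

-- ===== CLAIM (what is proved, stated in full; the proofs are below) =====
def Claim_equal_resolve_ambiguous_nodes : Prop :=
  ∀ (clusters : List (Int × List String)), Dom_resolve_ambiguous_nodes clusters →
    Pre_resolve_ambiguous_nodes clusters →
    Spec_resolve_ambiguous_nodes clusters (resolve_ambiguous_nodes clusters)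

-- ===== LEMMAS AND PROOFS =====

-- ## Part 1: the two ambiguous-kmer computations produce the same list.

lemma pv_foldl_union (vs : List (List String)) (s : PySem.Set String) :
    vs.foldl (fun s cluster => PySem.Set.union s cluster) s = PySem.Set.update s vs.flatten := by
  induction vs generalizing s with
  | nil => rfl
  | cons v vs ih =>
    simp only [List.foldl_cons, List.flatten_cons]
    rw [ih]
    simp [PySem.Set.union, PySem.Set.update, List.foldl_append]

lemma pv_count_nodup (k : String) (v : List String) (h : v.Nodup) :
    List.count k v = if k ∈ v then 1 else 0 := by
  by_cases hm : k ∈ v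
  · rw [if_pos hm]; exact List.count_eq_one_of_mem h hm
  · rw [if_neg hm]; exact List.count_eq_zero.mpr hm

lemma pv_count_flatten (k : String) (vs : List (List String)) (h : ∀ v ∈ vs, v.Nodup) :
    List.count k vs.flatten = List.countP (fun c => c.contains k) vs := by
  induction vs with
  | nil => rfl
  | cons v vs ih =>
    simp only [List.flatten_cons, List.count_append, List.countP_cons]
    rw [ih (fun w hw => h w (by simp [hw])), pv_count_nodup k v (h v (by simp))]
    by_cases hm : k ∈ v
    · simp [hm, Nat.add_comm]
    · simp [hm]

lemma pv_ambiguous_eq (clusters : List (Int × List String))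
    (hv : ∀ p ∈ clusters, p.2.Nodup) :
    ((clusters.map (·.2)).foldl (fun s cluster => PySem.Set.union s cluster)
        PySem.Set.empty).filter (fun kmer =>
      decide (1 < ((clusters.map (·.2)).map (fun cluster =>
        if cluster.contains kmer then (1 : Int) else 0)).sum)) =
    (((clusters.foldl
        (fun counts p =>
          p.2.foldl (fun counts kmer => counts.modify kmer 0 (· + 1)) counts)
        (PySem.Dict.empty : PySem.Dict String Int)).items.filter
          (fun p => decide (1 < p.2))).map (·.1)) := by
  -- the B-side counting loop is a counter over the flattened values
  have hcounts : (clusters.foldl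
        (fun counts p =>
          p.2.foldl (fun counts kmer => counts.modify kmer 0 (· + 1)) counts)
        (PySem.Dict.empty : PySem.Dict String Int))
      = PySem.Dict.counter ((clusters.map (·.2)).flatten) := by
    rw [PySem.Dict.counter_eq_foldl, List.foldl_flatten, List.foldl_map]
  simp only [hcounts]
  set D := (clusters.map (·.2)).flatten with hD
  rw [PySem.Dict.items_counter]
  rw [List.filter_map, List.map_map]
  have hfst : ((fun p : String × Int => p.1) ∘ fun k => (k, (List.count k D : Int))) = id := by
    funext k; rfl
  rw [hfst, List.map_id]
  -- the A-side union fold is ofList of the same flatten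
  rw [pv_foldl_union]
  have hofl : PySem.Set.update PySem.Set.empty (clusters.map (·.2)).flatten
      = PySem.Set.ofList D := rfl
  rw [hofl]
  -- the two filter predicates agree pointwise
  apply List.filter_congr
  intro k _
  have hc : List.count k D = List.countP (fun c => c.contains k) (clusters.map (·.2)) := by
    rw [hD, pv_count_flatten k _ ?_]
    intro v hvv
    obtain ⟨p, hp, hp2⟩ := List.mem_map.mp hvv
    exact hp2 ▸ hv p hp
  have hsum : ((clusters.map (·.2)).map (fun cluster =>
        if cluster.contains k then (1 : Int) else 0)).sum
      = (List.countP (fun c => c.contains k) (clusters.map (·.2)) : Int) :=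
    PySem.List.sum_map_ite_one_zero (fun c => c.contains k) (clusters.map (·.2))
  simp only [hsum, Function.comp_apply, hc]

-- ## Part 2: the nested removal loops equal a per-cluster filtering pass.

lemma pv_step_items (k : String) (d : PySem.Dict Int (List String)) (c : Int)
    (hnd : d.keys.Nodup) (hc : c ∈ d.keys) :
    (pvRemoveInner k d c).items =
      d.items.map (fun p => if p.1 = c then (p.1, p.2.erase k) else p) := by
  -- the entry at key c
  obtain ⟨p₀, hp₀, hp₀1⟩ : ∃ p₀ ∈ d.items, p₀.1 = c := by
    have : c ∈ d.items.map (·.1) := hc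
    simpa using this
  obtain ⟨v, hv⟩ : ∃ v, (c, v) ∈ d.items := ⟨p₀.2, by rwa [← hp₀1, Prod.mk.eta]⟩
  have hgetD : d.getD c [] = v := PySem.Dict.getD_of_mem_items d hv hnd []
  have hval : ∀ p ∈ d.items, p.1 = c → p.2 = v := by
    intro p hp hpc
    have h1 : d.get? p.1 = some p.2 := PySem.Dict.get?_of_mem_items d (by simpa using hp) hnd
    have h2 : d.get? c = some v := PySem.Dict.get?_of_mem_items d hv hnd
    rw [hpc] at h1; rw [h1] at h2; exact Option.some_inj.mp h2
  unfold pvRemoveInner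
  rw [hgetD]
  by_cases hk : v.contains k
  · rw [if_pos hk]
    have hr : PySem.List.remove? v k = some (v.erase k) :=
      PySem.List.remove?_eq_some_erase v k (by simpa using hk)
    rw [hr]
    simp only [Option.getD_some]
    have hcont : d.contains c = true := by
      rw [PySem.Dict.contains_iff_mem_keys]; exact hc
    rw [PySem.Dict.items_insert_of_contains d (v.erase k) hcont]
    apply List.map_congr_left
    intro p hp
    by_cases hpc : p.1 = c
    · simp only [hpc, beq_self_eq_true, if_pos]
      rw [hval p hp hpc]
    · simp [hpc]
  · rw [if_neg hk]
    have hmap : d.items.map (fun p => if p.1 = c then (p.1, p.2.erase k) else p)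
        = d.items.map id := by
      apply List.map_congr_left
      intro p hp
      by_cases hpc : p.1 = c
      · have hp2 : p.2 = v := hval p hp hpc
        have hnm : k ∉ p.2 := by rw [hp2]; simpa using hk
        rw [if_pos hpc, List.erase_of_not_mem hnm]; rfl
      · simp [hpc]
    rw [hmap, List.map_id]


lemma pv_step_keys (k : String) (d : PySem.Dict Int (List String)) (c : Int)
    (hnd : d.keys.Nodup) (hc : c ∈ d.keys) :
    (pvRemoveInner k d c).keys = d.keys := by
  have h := pv_step_items k d c hnd hc
  simp only [PySem.Dict.keys, h, List.map_map]
  apply List.map_congr_left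
  intro p hp
  by_cases hpc : p.1 = c <;> simp [hpc]

lemma pv_inner_items (k : String) (ks : List Int) (d : PySem.Dict Int (List String))
    (hnd : d.keys.Nodup) (hks : ks.Nodup) (hsub : ∀ c ∈ ks, c ∈ d.keys) :
    (ks.foldl (fun d cid => pvRemoveInner k d cid) d).items =
      d.items.map (fun p => if p.1 ∈ ks then (p.1, p.2.erase k) else p) := by
  induction ks generalizing d with
  | nil => simp
  | cons c ks ih =>
    simp only [List.foldl_cons]
    have hc : c ∈ d.keys := hsub c (by simp)
    have hkeys : (pvRemoveInner k d c).keys = d.keys := pv_step_keys k d c hnd hc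
    have hnd' : (pvRemoveInner k d c).keys.Nodup := by rw [hkeys]; exact hnd
    have hsub' : ∀ x ∈ ks, x ∈ (pvRemoveInner k d c).keys := by
      intro x hx; rw [hkeys]; exact hsub x (by simp [hx])
    rw [ih (pvRemoveInner k d c) hnd' hks.of_cons hsub']
    rw [pv_step_items k d c hnd hc, List.map_map]
    apply List.map_congr_left
    intro p _
    have hcks : c ∉ ks := (List.nodup_cons.mp hks).1
    by_cases hpc : p.1 = c
    · have : p.1 ∉ ks := by rw [hpc]; exact hcks
      simp [Function.comp_apply, hpc, hcks]
    · by_cases hpk : p.1 ∈ ks <;> simp [Function.comp_apply, hpc, hpk]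


lemma pv_outer_items (amb : List String) (d : PySem.Dict Int (List String))
    (hnd : d.keys.Nodup) :
    (amb.foldl (fun d kmer => d.keys.foldl (fun d cid => pvRemoveInner kmer d cid) d) d).items =
      d.items.map (fun p => (p.1, p.2.diff amb)) := by
  induction amb generalizing d with
  | nil =>
    simp only [List.foldl_nil]
    have : d.items.map (fun p => (p.1, p.2.diff ([] : List String))) = d.items.map id := by
      apply List.map_congr_left; intro p _; simp [List.diff_nil]
    rw [this, List.map_id]
  | cons kmer amb ih =>
    simp only [List.foldl_cons]
    set d₁ := d.keys.foldl (fun d cid => pvRemoveInner kmer d cid) d with hd₁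
    have hitems₁ : d₁.items = d.items.map (fun p => (p.1, p.2.erase kmer)) := by
      rw [hd₁, pv_inner_items kmer d.keys d hnd hnd (fun c hc => hc)]
      apply List.map_congr_left
      intro p hp
      rw [if_pos (PySem.Dict.mem_keys_of_mem_items d hp)]
    have hkeys₁ : d₁.keys = d.keys := by
      simp only [PySem.Dict.keys, hitems₁, List.map_map]
      rfl
    have hnd₁ : d₁.keys.Nodup := by rw [hkeys₁]; exact hnd
    rw [ih d₁ hnd₁, hitems₁, List.map_map]
    apply List.map_congr_left
    intro p _
    simp only [Function.comp_apply]
    rw [List.diff_cons]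


lemma pv_set_diff (l amb : List String) (h : l.Nodup) :
    PySem.Set.diff l amb = l.diff amb := by
  rw [h.diff_eq_filter]
  simp only [PySem.Set.diff]
  apply List.filter_congr
  intro x _
  simp [PySem.Set.contains]

-- ===== VERDICT (by name: the statement is the Claim_ definition above) =====
theorem resolve_ambiguous_nodes_spec : Claim_equal_resolve_ambiguous_nodes := by
  intro clusters hdom hpre
  obtain ⟨hkeys, hvnodup⟩ := hpre
  unfold Spec_resolve_ambiguous_nodes
  simp only [resolve_ambiguous_nodes, resolve_ambiguous_nodes_alt]
  have hvals : (PySem.Dict.mk clusters).values = clusters.map (·.2) := rfl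
  have hkeysmk : (PySem.Dict.mk clusters).keys = clusters.map (·.1) := rfl
  rw [hvals]
  have hamb := pv_ambiguous_eq clusters hvnodup
  refine Prod.ext ?_ hamb
  -- first components
  have hndk : (PySem.Dict.mk clusters).keys.Nodup := by rw [hkeysmk]; exact hkeys
  rw [pv_outer_items _ (PySem.Dict.mk clusters) hndk]
  have hitemsmk : (PySem.Dict.mk clusters).items = clusters := rfl
  rw [hitemsmk, ← hamb]
  apply List.map_congr_left
  intro p hp
  rw [pv_set_diff _ _ (hvnodup p hp)]
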